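-- pv_equiv track=rewrite | github.com/wael159/python_training | common_python_questions/nth_highest_key.py | nth_highest_key_main
-- ===== SOURCE A (Python) =====
-- def nth_highest_key_main(data=None, n=1):
--     """
--     Returns the key with the N-th highest value in the dictionary.
--     If there are not enough unique values, return None.
--     """
--     if data is None:
--         data = {'a': 10, 'b': 20, 'c': 30, 'd': 20}
--     if n < 1:
--         return None
--
--     # Step 1: Get unique values and sort them descending
--     unique_values = sorted(set(data.values()), reverse=True)
--     if n > len(unique_values):
--         return None
--
--     nth_value = unique_values[n - 1]
--
--     # Step 2: Return any key that has this value
--     return [k for k, v in data.items() if v == nth_value]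
-- ===== SOURCE B (Python) =====
-- def nth_highest_key_main(data=None, n=1):
--     """
--     Returns the key with the N-th highest value in the dictionary.
--     If there are not enough unique values, return None.
--     """
--     if data is None:
--         data = {'a': 10, 'b': 20, 'c': 30, 'd': 20}
--     if n < 1:
--         return None
--     # Find the n-th highest distinct value by repeated max-selection:
--     # each round takes the largest value strictly below the previous pick.
--     prev = None
--     for _ in range(n):
--         candidates = [v for v in data.values() if prev is None or v < prev]
--         if not candidates:
--             return None
--         prev = max(candidates)
--     return [k for k, v in data.items() if v == prev]
-- ===== Notes on version B (the rewrite author's own statement) =====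
-- stated objective: alternative
-- what changed: Replaces the single sort of the distinct values by n rounds of max-selection: each round scans the values for the largest one strictly below the previous pick, returning None when the values are exhausted before round n.
import Mathlib
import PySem

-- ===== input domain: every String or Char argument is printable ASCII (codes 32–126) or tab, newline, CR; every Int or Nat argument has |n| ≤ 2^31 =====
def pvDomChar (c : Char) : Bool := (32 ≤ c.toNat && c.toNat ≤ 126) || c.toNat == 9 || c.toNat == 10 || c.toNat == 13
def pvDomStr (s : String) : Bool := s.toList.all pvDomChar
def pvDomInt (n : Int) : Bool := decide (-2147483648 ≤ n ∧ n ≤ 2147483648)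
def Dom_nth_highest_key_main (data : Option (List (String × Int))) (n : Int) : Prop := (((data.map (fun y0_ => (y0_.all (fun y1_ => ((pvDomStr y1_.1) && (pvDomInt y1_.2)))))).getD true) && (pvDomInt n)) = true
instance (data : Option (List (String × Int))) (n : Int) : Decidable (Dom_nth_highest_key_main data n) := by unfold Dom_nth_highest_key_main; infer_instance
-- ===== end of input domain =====

-- B replaces A's single descending sort of the distinct values by n rounds of
-- max-selection (each round picks the largest value strictly below the previous
-- pick); same results, a different algorithm of similar cost.

-- ===== PORT A =====
def nth_highest_key_main (data : Option (List (String × Int))) (n : Int) : Option (List String) :=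
  let d : PySem.Dict String Int :=
    PySem.Dict.ofList (data.getD [("a", 10), ("b", 20), ("c", 30), ("d", 20)])
  if n < 1 then none
  else
    let unique_values := PySem.List.sorted (PySem.Set.ofList d.values) (fun v => v) true
    if n > (unique_values.length : Int) then none
    else
      -- unique_values[n - 1]: in range here since 1 ≤ n ≤ len(unique_values)
      let nth_value := PySem.List.pyGetD unique_values (n - 1) 0
      some ((d.items.filter (fun p => p.2 == nth_value)).map (fun p => p.1))

-- ===== PORT B =====
-- the for-loop of Source B: up to `count` further rounds, `prev` the previous pick
def pvPickNth (vals : List Int) : Nat → Option Int → Option Int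
  | 0, prev => prev
  | k + 1, prev =>
    let candidates := vals.filter (fun v =>
      match prev with
      | none => true
      | some p => decide (v < p))
    match PySem.List.max? candidates (fun v => v) with
    | none => none
    | some m => pvPickNth vals k (some m)

def nth_highest_key_main_alt (data : Option (List (String × Int))) (n : Int) : Option (List String) :=
  let d : PySem.Dict String Int :=
    PySem.Dict.ofList (data.getD [("a", 10), ("b", 20), ("c", 30), ("d", 20)])
  if n < 1 then none
  else
    match pvPickNth d.values n.toNat none with
    | none => none
    | some prev => some ((d.items.filter (fun p => p.2 == prev)).map (fun p => p.1))

-- ===== PRECONDITION & SPEC =====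
def Spec_nth_highest_key_main (data : Option (List (String × Int))) (n : Int) (out : Option (List String)) : Prop := out = nth_highest_key_main_alt data n
instance (data : Option (List (String × Int))) (n : Int) (out : Option (List String)) : Decidable (Spec_nth_highest_key_main data n out) := by unfold Spec_nth_highest_key_main; infer_instance

-- ===== CLAIM (what is proved, stated in full; the proofs are below) =====
def Claim_equal_nth_highest_key_main : Prop := ∀ (data : Option (List (String × Int))) (n : Int), Dom_nth_highest_key_main data n → Spec_nth_highest_key_main data n (nth_highest_key_main data n)

-- ===== LEMMAS AND PROOFS =====

-- the maximum of a list of ints is any member that bounds every member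
theorem pv_max?_eq_some {xs : List Int} {m : Int} (hm : m ∈ xs)
    (hub : ∀ y ∈ xs, y ≤ m) : PySem.List.max? xs (fun v => v) = some m := by
  cases h : PySem.List.max? xs (fun v => v) with
  | none => exact absurd ((PySem.List.max?_eq_none_iff xs _).mp h ▸ hm) (List.not_mem_nil)
  | some m' =>
    have h1 : m' ≤ m := hub m' (PySem.List.max?_mem h)
    have h2 : m ≤ m' := PySem.List.max?_isMax h m hm
    rw [le_antisymm h1 h2]

-- the largest value strictly below p is the head of the strictly descending
-- list S of the distinct values below p
theorem pv_max_cands (vs S : List Int) (p : Int)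
    (hmem : ∀ x, x ∈ S ↔ x ∈ vs ∧ x < p)
    (hpw : S.Pairwise (fun a b => b < a)) :
    PySem.List.max? (vs.filter (fun v => decide (v < p))) (fun v => v) = S.head? := by
  have hc : ∀ x, x ∈ vs.filter (fun v => decide (v < p)) ↔ x ∈ S := by
    intro x
    rw [List.mem_filter, hmem, decide_eq_true_iff]
  cases S with
  | nil =>
    rw [(PySem.List.max?_eq_none_iff _ _).mpr ?_]
    · rfl
    · rw [List.eq_nil_iff_forall_not_mem]
      intro x hx
      exact absurd ((hc x).mp hx) (List.not_mem_nil)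
  | cons s₀ S' =>
    have hub : ∀ y ∈ vs.filter (fun v => decide (v < p)), y ≤ s₀ := by
      intro y hy
      rcases List.mem_cons.mp ((hc y).mp hy) with h | h
      · exact le_of_eq h
      · exact le_of_lt ((List.pairwise_cons.mp hpw).1 y h)
    rw [pv_max?_eq_some ((hc s₀).mpr (List.mem_cons_self)) hub]
    rfl

-- the loop invariant transported one round further
theorem pv_tail_hyps (vs S' : List Int) (s₀ p : Int)
    (hmem : ∀ x, x ∈ s₀ :: S' ↔ x ∈ vs ∧ x < p)
    (hpw : (s₀ :: S').Pairwise (fun a b => b < a)) :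
    (∀ x, x ∈ S' ↔ x ∈ vs ∧ x < s₀) ∧ S'.Pairwise (fun a b => b < a) := by
  rw [List.pairwise_cons] at hpw
  refine ⟨fun x => ⟨fun hx => ?_, fun hx => ?_⟩, hpw.2⟩
  · exact ⟨((hmem x).mp (List.mem_cons_of_mem _ hx)).1, hpw.1 x hx⟩
  · have hs₀ : s₀ < p := ((hmem s₀).mp (List.mem_cons_self)).2
    rcases List.mem_cons.mp ((hmem x).mpr ⟨hx.1, lt_trans hx.2 hs₀⟩) with h | h
    · omega
    · exact h

-- after k+1 further rounds starting below p, `prev` is the (k+1)-st distinct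
-- value below p, i.e. S[k] for the strictly descending list S of those values
theorem pvPickNth_tail (vs : List Int) (k : Nat) : ∀ (S : List Int) (p : Int),
    (∀ x, x ∈ S ↔ x ∈ vs ∧ x < p) → S.Pairwise (fun a b => b < a) →
    pvPickNth vs (k + 1) (some p) = S[k]? := by
  induction k with
  | zero =>
    intro S p hmem hpw
    simp only [pvPickNth, pv_max_cands vs S p hmem hpw]
    cases S with
    | nil => rfl
    | cons s₀ S' => rfl
  | succ k ih =>
    intro S p hmem hpw
    simp only [pvPickNth, pv_max_cands vs S p hmem hpw]
    cases S with
    | nil => rfl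
    | cons s₀ S' =>
      obtain ⟨h1, h2⟩ := pv_tail_hyps vs S' s₀ p hmem hpw
      simpa only [pvPickNth] using ih S' s₀ h1 h2

-- the whole loop: after k+1 rounds from scratch, `prev` is S[k]
theorem pvPickNth_all (vs : List Int) (k : Nat) (S : List Int)
    (hmem : ∀ x, x ∈ S ↔ x ∈ vs)
    (hpw : S.Pairwise (fun a b => b < a)) :
    pvPickNth vs (k + 1) none = S[k]? := by
  have hmax : PySem.List.max? (vs.filter (fun _ => true)) (fun v => v) = S.head? := by
    rw [List.filter_true]
    cases S with
    | nil =>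
      rw [(PySem.List.max?_eq_none_iff _ _).mpr ?_]
      · rfl
      · rw [List.eq_nil_iff_forall_not_mem]
        intro x hx
        exact absurd ((hmem x).mpr hx) (List.not_mem_nil)
    | cons s₀ S' =>
      have hub : ∀ y ∈ vs, y ≤ s₀ := by
        intro y hy
        rcases List.mem_cons.mp ((hmem y).mpr hy) with h | h
        · exact le_of_eq h
        · exact le_of_lt ((List.pairwise_cons.mp hpw).1 y h)
      rw [pv_max?_eq_some ((hmem s₀).mp (List.mem_cons_self)) hub]
      rfl
  simp only [pvPickNth, hmax]
  cases S with
  | nil => rfl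
  | cons s₀ S' =>
    rw [List.pairwise_cons] at hpw
    have h1 : ∀ x, x ∈ S' ↔ x ∈ vs ∧ x < s₀ := by
      intro x
      constructor
      · intro hx
        exact ⟨(hmem x).mp (List.mem_cons_of_mem _ hx), hpw.1 x hx⟩
      · intro hx
        rcases List.mem_cons.mp ((hmem x).mpr hx.1) with h | h
        · omega
        · exact h
    cases k with
    | zero => rfl
    | succ k' => simpa only [pvPickNth] using pvPickNth_tail vs k' S' s₀ h1 hpw.2

-- A = B on any explicit items list
theorem pv_core (l : List (String × Int)) (n : Int) :
    nth_highest_key_main (some l) n = nth_highest_key_main_alt (some l) n := by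
  unfold nth_highest_key_main nth_highest_key_main_alt
  simp only [Option.getD_some]
  by_cases hn : n < 1
  · simp [hn]
  · simp only [if_neg hn]
    set d := PySem.Dict.ofList l with hd
    set vs := d.values with hvs
    set S := PySem.List.sorted (PySem.Set.ofList vs) (fun v => v) true with hS
    have hmem : ∀ x, x ∈ S ↔ x ∈ vs := by
      intro x
      rw [hS, PySem.List.mem_sorted, PySem.Set.mem_ofList]
    have hnd : S.Nodup :=
      (PySem.List.sorted_perm _ _ _).nodup_iff.mpr (PySem.Set.nodup_ofList vs)
    have hle : S.Pairwise (fun a b => b ≤ a) :=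
      PySem.List.sorted_pairwise_rev (PySem.Set.ofList vs) (fun v => v)
    have hpw : S.Pairwise (fun a b => b < a) :=
      (hle.and hnd).imp (fun h => lt_of_le_of_ne h.1 (Ne.symm h.2))
    obtain ⟨k, hk⟩ : ∃ k, n.toNat = k + 1 := ⟨n.toNat - 1, by omega⟩
    rw [hk, pvPickNth_all vs k S hmem hpw]
    by_cases hlen : n > (S.length : Int)
    · have hks : S.length ≤ k := by omega
      simp [hlen, List.getElem?_eq_none hks]
    · have hklt : k < S.length := by omega
      have hn1 : n - 1 = ((k : Nat) : Int) := by omega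
      rw [if_neg hlen, hn1, PySem.List.pyGetD_natCast,
        List.getElem?_eq_getElem hklt]
      simp [List.getD_eq_getElem?_getD, List.getElem?_eq_getElem hklt]

-- ===== VERDICT (by name: the statement is the Claim_ definition above) =====
theorem nth_highest_key_main_spec : Claim_equal_nth_highest_key_main := by
  intro data n _
  unfold Spec_nth_highest_key_main
  cases data with
  | none => exact pv_core [("a", 10), ("b", 20), ("c", 30), ("d", 20)] n
  | some l => exact pv_core l n
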